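-- pv_equiv track=rewrite | github.com/aditchopra18/Custom-NER-using-BiLSTM-LSTM-and-BERT-with-Attention-Mechanims | Main.py | tag_annotations
-- ===== SOURCE A (Python) =====
-- def tag_annotations(sentences, annotations):
--     tagged_sentences = []
--     char_count = 0
--
--     for sentence in sentences:
--         # edited_sent = remove_punctuations(sentence)
--         tags = ['O'] * len(sentence)
--         word_starts = []
--         char_pos = 0
--         for word in sentence:
--             word_starts.append(char_pos)
--             char_pos += len(word) + 1
--
--         for start, end, disease_info, label in annotations:
--             for i, word_start in enumerate(word_starts):
--                 word_end = word_start + len(sentence[i])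
--                 if word_start <= start < word_end or word_start < end <= word_end: # The words having punctuation either at start or end
--                     tags[i] = 'I-' + label
--                 if start <= word_start < end or start < word_end <= end: # The words without punctuations
--                     tags[i] = 'I-' + label
--
--         tagged_sentences.append((sentence, tags))
--
--     return tagged_sentences
-- ===== SOURCE B (Python) =====
-- def tag_annotations(sentences, annotations):
--     # word-major single pass: stream char positions, and for each word scan the
--     # annotations from the back, stopping at the first (= last-written) match
--     rev = list(reversed(annotations))
--     out = []
--     for sentence in sentences:
--         tags = []
--         pos = 0
--         for word in sentence:
--             ws = pos
--             we = pos + len(word)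
--             pos = we + 1
--             tag = 'O'
--             for s, e, _info, lab in rev:
--                 if ws <= s < we or ws < e <= we or s <= ws < e or s < we <= e:
--                     tag = 'I-' + lab
--                     break
--             tags.append(tag)
--         out.append((sentence, tags))
--     return out
-- ===== Notes on version B (the rewrite author's own statement) =====
-- stated objective: alternative
-- what changed: B inverts the loop nesting: instead of A's mutable tags array rewritten by every annotation over a precomputed word_starts list, B streams character positions word by word and, per word, scans the annotations back-to-front stopping at the first (= last-written) match, building the tag list without index assignment (early exit and no repeated list writes give a constant-factor speed-up).
import Mathlib
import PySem

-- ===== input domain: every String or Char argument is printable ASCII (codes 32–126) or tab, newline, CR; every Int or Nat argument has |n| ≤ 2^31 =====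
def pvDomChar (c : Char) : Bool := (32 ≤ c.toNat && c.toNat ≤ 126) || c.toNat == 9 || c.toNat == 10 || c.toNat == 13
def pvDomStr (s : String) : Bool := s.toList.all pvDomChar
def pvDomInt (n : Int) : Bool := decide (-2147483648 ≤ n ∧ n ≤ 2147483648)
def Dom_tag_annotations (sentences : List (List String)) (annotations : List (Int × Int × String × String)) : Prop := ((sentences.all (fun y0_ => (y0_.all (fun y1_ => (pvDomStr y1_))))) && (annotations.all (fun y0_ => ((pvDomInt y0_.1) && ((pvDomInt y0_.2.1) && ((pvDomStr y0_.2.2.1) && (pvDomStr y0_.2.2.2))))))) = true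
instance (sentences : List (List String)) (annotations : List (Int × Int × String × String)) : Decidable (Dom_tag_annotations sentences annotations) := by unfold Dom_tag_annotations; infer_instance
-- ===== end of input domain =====

-- B replaces A's annotation-major rewriting of a mutable tags array by a word-major
-- streaming pass with a back-to-front early-exit scan over the annotations (same results).

-- ===== PORT A =====
-- A's `char_count` variable is never read; it is omitted.
-- One body of A's inner loop: word_end, then the two successive conditional assignments tags[i] = 'I-'+label.
def pvStepA (sentence : List String) (tags : List String)
    (ann : Int × Int × String × String) (iws : Int × Int) : List String :=
  -- sentence[i]: i ranges over enumerate(word_starts) and word_starts has len(sentence) entries,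
  -- so the index is always in range and pyGetD is exact here
  let wordEnd := iws.2 + PySem.Str.len (PySem.List.pyGetD sentence iws.1 "")
  let tags1 := if (iws.2 ≤ ann.1 ∧ ann.1 < wordEnd) ∨ (iws.2 < ann.2.1 ∧ ann.2.1 ≤ wordEnd)
               then PySem.List.pySetD tags iws.1 ("I-" ++ ann.2.2.2) else tags
  if (ann.1 ≤ iws.2 ∧ iws.2 < ann.2.1) ∨ (ann.1 < wordEnd ∧ wordEnd ≤ ann.2.1)
  then PySem.List.pySetD tags1 iws.1 ("I-" ++ ann.2.2.2) else tags1

def tag_annotations (sentences : List (List String)) (annotations : List (Int × Int × String × String)) : List (List String × List String) :=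
  sentences.foldl (fun acc sentence =>
    let tags0 := List.replicate sentence.length "O"
    let wordStarts := (sentence.foldl (fun (st : Int × List Int) word =>
        (st.1 + PySem.Str.len word + 1, st.2 ++ [st.1])) ((0 : Int), ([] : List Int))).2
    let tags := annotations.foldl (fun tags ann =>
        (PySem.List.enumerate wordStarts 0).foldl (fun t iws => pvStepA sentence t ann iws) tags) tags0
    acc ++ [(sentence, tags)]) []

-- ===== PORT B =====
-- B's inner `for ... in rev: if ...: tag = ...; break` loop
def pvMatchB : List (Int × Int × String × String) → Int → Int → String
  | [], _, _ => "O"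
  | a :: rest, ws, we =>
    if (ws ≤ a.1 ∧ a.1 < we) ∨ (ws < a.2.1 ∧ a.2.1 ≤ we) ∨ (a.1 ≤ ws ∧ ws < a.2.1) ∨ (a.1 < we ∧ we ≤ a.2.1)
    then "I-" ++ a.2.2.2 else pvMatchB rest ws we

-- B's `for word in sentence` loop streaming the char position `pos`
def pvTagsB (rev : List (Int × Int × String × String)) : List String → Int → List String
  | [], _ => []
  | word :: rest, pos =>
    let we := pos + PySem.Str.len word
    pvMatchB rev pos we :: pvTagsB rev rest (we + 1)

def tag_annotations_alt (sentences : List (List String)) (annotations : List (Int × Int × String × String)) : List (List String × List String) :=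
  sentences.map (fun sentence => (sentence, pvTagsB annotations.reverse sentence 0))

-- ===== PRECONDITION & SPEC =====
def Spec_tag_annotations (sentences : List (List String)) (annotations : List (Int × Int × String × String)) (out : List (List String × List String)) : Prop := out = tag_annotations_alt sentences annotations
instance (sentences : List (List String)) (annotations : List (Int × Int × String × String)) (out : List (List String × List String)) : Decidable (Spec_tag_annotations sentences annotations out) := by unfold Spec_tag_annotations; infer_instance

-- ===== CLAIM (what is proved, stated in full; the proofs are below) =====
def Claim_equal_tag_annotations : Prop := ∀ (sentences : List (List String)) (annotations : List (Int × Int × String × String)), Dom_tag_annotations sentences annotations → Spec_tag_annotations sentences annotations (tag_annotations sentences annotations)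

-- ===== LEMMAS AND PROOFS =====

-- the word-start positions of a (suffix of a) sentence, starting at char position p
def pvStarts : Int → List String → List Int
  | _, [] => []
  | p, w :: rest => p :: pvStarts (p + PySem.Str.len w + 1) rest

-- the combined overlap test, as a Bool
def pvCond (a : Int × Int × String × String) (ws we : Int) : Bool :=
  decide ((ws ≤ a.1 ∧ a.1 < we) ∨ (ws < a.2.1 ∧ a.2.1 ≤ we) ∨ (a.1 ≤ ws ∧ ws < a.2.1) ∨ (a.1 < we ∧ we ≤ a.2.1))

-- first match (as Option) in a list of annotations
def pvFm : List (Int × Int × String × String) → Int → Int → Option String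
  | [], _, _ => none
  | a :: rest, ws, we => if pvCond a ws we then some ("I-" ++ a.2.2.2) else pvFm rest ws we

-- last match (as Option) in a list of annotations
def pvLm : List (Int × Int × String × String) → Int → Int → Option String
  | [], _, _ => none
  | a :: rest, ws, we =>
    match pvLm rest ws we with
    | some t => some t
    | none => if pvCond a ws we then some ("I-" ++ a.2.2.2) else none

lemma pvStarts_length (p : Int) (sent : List String) : (pvStarts p sent).length = sent.length := by
  induction sent generalizing p with
  | nil => rfl
  | cons w rest ih => simp [pvStarts, ih]

lemma pvWordStarts_eq (sent : List String) (p : Int) (acc : List Int) :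
    (sent.foldl (fun (st : Int × List Int) word =>
      (st.1 + PySem.Str.len word + 1, st.2 ++ [st.1])) (p, acc)).2 = acc ++ pvStarts p sent := by
  induction sent generalizing p acc with
  | nil => simp [pvStarts]
  | cons w rest ih => simp only [List.foldl]; rw [ih]; simp [pvStarts]

lemma pvMatchB_eq_fm (l : List (Int × Int × String × String)) (ws we : Int) :
    pvMatchB l ws we = (pvFm l ws we).getD "O" := by
  induction l with
  | nil => rfl
  | cons a rest ih =>
    simp only [pvMatchB, pvFm]
    by_cases h : (ws ≤ a.1 ∧ a.1 < we) ∨ (ws < a.2.1 ∧ a.2.1 ≤ we) ∨ (a.1 ≤ ws ∧ ws < a.2.1) ∨ (a.1 < we ∧ we ≤ a.2.1)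
    · simp [pvCond, h]
    · simp [pvCond, h, ih]

lemma pvFm_append (l₁ l₂ : List (Int × Int × String × String)) (ws we : Int) :
    pvFm (l₁ ++ l₂) ws we = ((pvFm l₁ ws we).or (pvFm l₂ ws we)) := by
  induction l₁ with
  | nil => simp [pvFm]
  | cons a rest ih =>
    simp only [List.cons_append, pvFm, ih]
    by_cases h : pvCond a ws we = true <;> simp [h]

lemma pvLm_eq_fm_reverse (l : List (Int × Int × String × String)) (ws we : Int) :
    pvLm l ws we = pvFm l.reverse ws we := by
  induction l with
  | nil => rfl
  | cons a rest ih =>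
    simp only [pvLm, List.reverse_cons, pvFm_append, ih]
    cases pvFm rest.reverse ws we <;> simp [pvFm, Option.or]

lemma pvTagsB_eq_map (rev : List (Int × Int × String × String)) (sent : List String) (p : Int) :
    pvTagsB rev sent p
      = ((pvStarts p sent).zip sent).map (fun x => pvMatchB rev x.1 (x.1 + PySem.Str.len x.2)) := by
  induction sent generalizing p with
  | nil => rfl
  | cons w rest ih => simp [pvTagsB, pvStarts, ih]

-- the inner enumerate-fold of A rewrites exactly the tail positions, elementwise
lemma pvStepA_gen (ann : Int × Int × String × String) :
    ∀ (sentTail : List String) (p : Int) (sentPre Tpre Ttail : List String),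
      Ttail.length = sentTail.length → Tpre.length = sentPre.length →
      (PySem.List.enumerate (pvStarts p sentTail) (sentPre.length : Int)).foldl
          (fun t iws => pvStepA (sentPre ++ sentTail) t ann iws) (Tpre ++ Ttail)
      = Tpre ++ (((pvStarts p sentTail).zip sentTail).zip Ttail).map
          (fun q => if pvCond ann q.1.1 (q.1.1 + PySem.Str.len q.1.2) then "I-" ++ ann.2.2.2 else q.2) := by
  intro sentTail
  induction sentTail with
  | nil =>
    intro p sentPre Tpre Ttail hT hP
    have : Ttail = [] := List.eq_nil_of_length_eq_zero hT
    subst this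
    simp [pvStarts]
  | cons w rest ih =>
    intro p sentPre Tpre Ttail hT hP
    cases Ttail with
    | nil => simp at hT
    | cons t ts =>
      simp only [pvStarts, PySem.List.enumerate_cons, List.foldl_cons]
      have hstep : pvStepA (sentPre ++ w :: rest) (Tpre ++ t :: ts) ann ((sentPre.length : Int), p)
          = Tpre ++ (if pvCond ann p (p + PySem.Str.len w) then "I-" ++ ann.2.2.2 else t) :: ts := by
        have hget : PySem.List.pyGetD (sentPre ++ w :: rest) ((sentPre.length : Int)) "" = w := by
          rw [PySem.List.pyGetD_natCast]; simp [List.getD]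
        have hset : ∀ (x : String) (v : String),
            (Tpre ++ x :: ts).set sentPre.length v = Tpre ++ v :: ts := by
          intro x v
          rw [← hP]
          simp
        simp only [pvStepA, hget, pvCond, PySem.List.pySetD_natCast, PySem.Str.len_eq]
        by_cases h12 : ((p ≤ ann.1 ∧ ann.1 < p + (w.length : Int)) ∨ (p < ann.2.1 ∧ ann.2.1 ≤ p + (w.length : Int))) <;>
          by_cases h34 : ((ann.1 ≤ p ∧ p < ann.2.1) ∨ (ann.1 < p + (w.length : Int) ∧ p + (w.length : Int) ≤ ann.2.1)) <;>
            simp [h12, h34, hset]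
      rw [hstep]
      have hcons : Tpre ++ (if pvCond ann p (p + PySem.Str.len w) then "I-" ++ ann.2.2.2 else t) :: ts
          = (Tpre ++ [(if pvCond ann p (p + PySem.Str.len w) then "I-" ++ ann.2.2.2 else t)]) ++ ts := by
        simp
      have harr : sentPre ++ w :: rest = (sentPre ++ [w]) ++ rest := by simp
      have hn : (sentPre.length : Int) + 1 = (((sentPre ++ [w]).length : Nat) : Int) := by
        simp [List.length_append]
      rw [hcons, harr, hn, ih (p + PySem.Str.len w + 1) (sentPre ++ [w]) _ ts (by simpa using hT) (by simp [hP])]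
      simp

-- one annotation pass of A = pointwise conditional overwrite
lemma pvStepA_eq (sent T : List String) (ann : Int × Int × String × String)
    (hT : T.length = sent.length) :
    (PySem.List.enumerate (pvStarts 0 sent) 0).foldl (fun t iws => pvStepA sent t ann iws) T
      = (((pvStarts 0 sent).zip sent).zip T).map
          (fun q => if pvCond ann q.1.1 (q.1.1 + PySem.Str.len q.1.2) then "I-" ++ ann.2.2.2 else q.2) := by
  simpa using pvStepA_gen ann sent 0 [] [] T hT rfl

lemma pvZipMapZip {α β γ : Type} (Z : List α) (T : List β) (f : α × β → β) (g : α × β → γ) :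
    (Z.zip ((Z.zip T).map f)).map g = (Z.zip T).map (fun q => g (q.1, f q)) := by
  induction Z generalizing T with
  | nil => rfl
  | cons z zs ih =>
    cases T with
    | nil => rfl
    | cons t ts => simp [ih]

-- the annotation fold of A = pointwise last-match with fallback
lemma pvFoldA_eq (anns : List (Int × Int × String × String)) (sent : List String) :
    ∀ (T : List String), T.length = sent.length →
    anns.foldl (fun tags ann =>
        (PySem.List.enumerate (pvStarts 0 sent) 0).foldl (fun t iws => pvStepA sent t ann iws) tags) T
      = (((pvStarts 0 sent).zip sent).zip T).map
          (fun q => match pvLm anns q.1.1 (q.1.1 + PySem.Str.len q.1.2) with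
                    | some t => t
                    | none => q.2) := by
  induction anns with
  | nil =>
    intro T hT
    have hZ : ((pvStarts 0 sent).zip sent).length = T.length := by
      simp [pvStarts_length, hT]
    simp only [List.foldl_nil, pvLm]
    exact (List.map_snd_zip (le_of_eq hZ.symm)).symm
  | cons a as ih =>
    intro T hT
    simp only [List.foldl_cons]
    rw [pvStepA_eq sent T a hT]
    have hlen : ((((pvStarts 0 sent).zip sent).zip T).map
        (fun q => if pvCond a q.1.1 (q.1.1 + PySem.Str.len q.1.2) then "I-" ++ a.2.2.2 else q.2)).length
        = sent.length := by
      simp [pvStarts_length, hT]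
    rw [ih _ hlen, pvZipMapZip]
    apply List.map_congr_left
    intro q _
    simp only [pvLm]
    cases pvLm as q.1.1 (q.1.1 + PySem.Str.len q.1.2) with
    | some t => simp
    | none => split_ifs <;> simp

lemma pvZip_replicate {α : Type} (Z : List α) (c : String) {γ : Type} (g : α × String → γ) :
    (Z.zip (List.replicate Z.length c)).map g = Z.map (fun z => g (z, c)) := by
  induction Z with
  | nil => rfl
  | cons z rest ih => simpa [List.replicate_succ] using ih

lemma pvPerSentence (sent : List String) (anns : List (Int × Int × String × String)) :
    anns.foldl (fun tags ann =>
        (PySem.List.enumerate (pvStarts 0 sent) 0).foldl (fun t iws => pvStepA sent t ann iws) tags)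
      (List.replicate sent.length "O")
      = pvTagsB anns.reverse sent 0 := by
  rw [pvFoldA_eq anns sent _ (by simp), pvTagsB_eq_map]
  have hrep : List.replicate sent.length "O"
      = List.replicate ((pvStarts 0 sent).zip sent).length "O" := by
    simp [pvStarts_length]
  rw [hrep, pvZip_replicate]
  apply List.map_congr_left
  intro q _
  rw [pvMatchB_eq_fm, ← pvLm_eq_fm_reverse]
  cases pvLm anns q.1 (q.1 + PySem.Str.len q.2) <;> simp

-- ===== VERDICT (by name: the statement is the Claim_ definition above) =====
theorem tag_annotations_spec : Claim_equal_tag_annotations := by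
  intro sentences annotations _
  unfold Spec_tag_annotations
  simp only [tag_annotations, tag_annotations_alt]
  rw [PySem.List.foldl_append_singleton_eq_map]
  apply List.map_congr_left
  intro sent _
  have hws := pvWordStarts_eq sent 0 []
  simp only [List.nil_append] at hws
  rw [hws, pvPerSentence]
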